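-- pv_equiv track=rewrite | github.com/2KAbhishek/poetry-checker | src/poetry_functions.py | get_symbol_to_lines
-- ===== SOURCE A (Python) =====
-- from typing import List, Tuple, Dict
--
-- def get_symbol_to_lines(rhyme_scheme: Tuple[str]) -> Dict[str, List[int]]:
--     """Return a dictionary where each key is an item in rhyme_scheme and
--     its corresponding value is a list of the indexes in rhyme_scheme where
--     the item appears.
--
--     >>> result = get_symbol_to_lines(('A', 'A', 'B', 'B', 'A'))
--     >>> expected = {'A': [0, 1, 4], 'B': [2, 3]}
--     >>> expected == result
--     True
--     >>> result = get_symbol_to_lines(('*', '*', '*', '*', '*'))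
--     >>> expected = {'*': [0, 1, 2, 3, 4]}
--     >>> expected == result
--     True
--     """
--     symbol_to_lines = {}
--     for index in range(len(rhyme_scheme)):
--         symbol = rhyme_scheme[index]
--         if symbol not in symbol_to_lines:
--             symbol_to_lines[symbol] = [index]
--         else:
--             symbol_to_lines[symbol].append(index)
--     return symbol_to_lines
-- ===== SOURCE B (Python) =====
-- def get_symbol_to_lines(rhyme_scheme):
--     return {s: [i for i, x in enumerate(rhyme_scheme) if x == s]
--             for s in dict.fromkeys(rhyme_scheme)}
-- ===== Notes on version B (the rewrite author's own statement) =====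
-- stated objective: alternative
-- what changed: Replaced the single-pass dict-grouping loop by a dict comprehension that first computes the distinct symbols in first-appearance order and then rescans the whole sequence once per distinct symbol to collect its indices.
import Mathlib
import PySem

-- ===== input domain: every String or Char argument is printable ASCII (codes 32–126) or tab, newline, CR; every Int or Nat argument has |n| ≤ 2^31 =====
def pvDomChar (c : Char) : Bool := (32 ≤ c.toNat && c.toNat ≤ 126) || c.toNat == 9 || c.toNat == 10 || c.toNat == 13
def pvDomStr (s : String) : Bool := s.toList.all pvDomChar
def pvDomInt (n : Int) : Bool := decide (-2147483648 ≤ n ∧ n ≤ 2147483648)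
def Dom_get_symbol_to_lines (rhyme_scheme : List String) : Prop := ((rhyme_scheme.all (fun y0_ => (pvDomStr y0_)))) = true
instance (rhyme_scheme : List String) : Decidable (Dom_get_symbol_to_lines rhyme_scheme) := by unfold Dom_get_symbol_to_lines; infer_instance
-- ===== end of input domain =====

-- B replaces A's single-pass dict grouping by a per-distinct-symbol rescan (dict comprehension); alternative decomposition, not faster.

-- ===== PORT A =====
-- literal port: for index in range(len(rs)): symbol = rs[index]; if symbol not in d: d[symbol] = [index] else d[symbol].append(index)
def get_symbol_to_lines (rhyme_scheme : List String) : List (String × List Int) :=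
  ((PySem.List.pyRange 0 (PySem.List.len rhyme_scheme) 1).foldl
    (fun d index =>
      let symbol := PySem.List.pyGetD rhyme_scheme index ""   -- index is always in range here, so pyGetD is exact
      if ¬ d.contains symbol then d.insert symbol [index]
      else d.modify symbol [] (fun l => l ++ [index]))
    PySem.Dict.empty).items

-- ===== PORT B =====
-- literal port of Source B: {s: [i for i, x in enumerate(rs) if x == s] for s in dict.fromkeys(rs)}
def get_symbol_to_lines_alt (rhyme_scheme : List String) : List (String × List Int) :=
  (PySem.List.dedup rhyme_scheme).map
    (fun s => (s, (PySem.List.enumerate rhyme_scheme).filterMap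
      (fun p => if p.2 = s then some p.1 else none)))

-- ===== PRECONDITION & SPEC =====
def Spec_get_symbol_to_lines (rhyme_scheme : List String) (out : List (String × List Int)) : Prop := out = get_symbol_to_lines_alt rhyme_scheme
instance (rhyme_scheme : List String) (out : List (String × List Int)) : Decidable (Spec_get_symbol_to_lines rhyme_scheme out) := by unfold Spec_get_symbol_to_lines; infer_instance

-- ===== CLAIM (what is proved, stated in full; the proofs are below) =====
def Claim_equal_get_symbol_to_lines : Prop := ∀ (rhyme_scheme : List String), Dom_get_symbol_to_lines rhyme_scheme → Spec_get_symbol_to_lines rhyme_scheme (get_symbol_to_lines rhyme_scheme)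

-- ===== LEMMAS AND PROOFS =====

-- A's two branches are both "append index to d.get(symbol, [])" (insert on a missing key = modify with default []).
theorem step_eq_modify (d : PySem.Dict String (List Int)) (s : String) (i : Int) :
    (if ¬ d.contains s then d.insert s [i] else d.modify s [] (fun l => l ++ [i]))
      = d.modify s [] (fun l => l ++ [i]) := by
  by_cases h : d.contains s
  · simp [h]
  · simp only [Bool.not_eq_true] at h
    simp [h, PySem.Dict.modify, PySem.Dict.getD_of_not_contains d [] h]

-- glue: B's inner comprehension over enumerate = map-of-filter over the swapped pairs
theorem filterMap_eq_map_filter_swap (l : List (Int × String)) (s : String) :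
    List.map (fun q => q.2) (List.filter (fun q => q.1 == s) (l.map (fun p => (p.2, p.1))))
      = l.filterMap (fun p => if p.2 = s then some p.1 else none) := by
  induction l with
  | nil => rfl
  | cons p t ih =>
    by_cases h : p.2 = s <;> simp [h, ih]

theorem get_symbol_to_lines_eq_alt (rs : List String) :
    get_symbol_to_lines rs = get_symbol_to_lines_alt rs := by
  unfold get_symbol_to_lines get_symbol_to_lines_alt
  -- rewrite A's loop as a fold of modify-append over the swapped enumerate pairs
  have hfold :
      (PySem.List.pyRange 0 (PySem.List.len rs) 1).foldl
        (fun d index =>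
          let symbol := PySem.List.pyGetD rs index ""
          if ¬ d.contains symbol then d.insert symbol [index]
          else d.modify symbol [] (fun l => l ++ [index]))
        PySem.Dict.empty
      = ((PySem.List.enumerate rs).map (fun p => (p.2, p.1))).foldl
          (fun d q => d.modify q.1 [] (fun l => l ++ [q.2])) PySem.Dict.empty := by
    rw [PySem.List.enumerate_eq_map_pyRange rs "", List.map_map, List.foldl_map]
    congr 1
    funext d j
    simpa using step_eq_modify d (PySem.List.pyGetD rs j "") j
  rw [hfold]
  set L := (PySem.List.enumerate rs).map (fun p => (p.2, p.1)) with hL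
  have hnodup : ((L.foldl (fun d q => d.modify q.1 [] (fun l => l ++ [q.2])) PySem.Dict.empty).keys).Nodup := by
    exact PySem.Dict.nodup_keys_foldl_modify_key L (fun q => q.1) []
      (fun _ q => fun l => l ++ [q.2]) PySem.Dict.empty (by simp [pysem])
  have hkeys : (L.foldl (fun d q => d.modify q.1 [] (fun l => l ++ [q.2])) PySem.Dict.empty).keys
      = PySem.List.dedup rs := by
    rw [PySem.Dict.keys_foldl_modify_key L (fun q => q.1) [] (fun _ q => fun l => l ++ [q.2]) PySem.Dict.empty]
    have : L.map (fun q => q.1) = rs := by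
      rw [hL, List.map_map]
      exact PySem.List.map_snd_enumerate rs 0
    rw [this]
    rfl
  rw [PySem.Dict.items_eq_map_keys _ hnodup [], hkeys]
  refine List.map_congr_left ?_
  intro s _
  rw [PySem.Dict.getD_foldl_modify_append L PySem.Dict.empty s]
  simp only [PySem.Dict.getD_empty, List.nil_append]
  rw [hL]
  exact congrArg (Prod.mk s) (filterMap_eq_map_filter_swap (PySem.List.enumerate rs) s)

-- ===== VERDICT (by name: the statement is the Claim_ definition above) =====
theorem get_symbol_to_lines_spec : Claim_equal_get_symbol_to_lines := by
  intro rs _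
  unfold Spec_get_symbol_to_lines
  exact get_symbol_to_lines_eq_alt rs
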